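-- pv_equiv track=rewrite | github.com/ZZy979/LeetCode | 程序员面试金典/8.5递归乘法/multiply_2.py | multiply_rec
-- ===== SOURCE A (Python) =====
-- def multiply_rec(a, b):
--     if a == 0:
--         return 0
--     elif a == 1:
--         return b
--
--     half_a = a >> 1
--     half_prod = multiply_rec(half_a, b)
--     return half_prod + half_prod if a % 2 == 0 else half_prod + half_prod + b
-- ===== SOURCE B (Python) =====
-- def multiply_rec(a, b):
--     result = 0
--     while a > 0:
--         if a % 2 == 1:
--             result += b
--         a >>= 1
--         b <<= 1
--     return result
-- ===== Notes on version B (the rewrite author's own statement) =====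
-- stated objective: alternative
-- what changed: Replaces the recursive halve-and-double decomposition with an iterative shift-and-add loop over the bits of a, accumulating the doubled b into a running result.
import Mathlib
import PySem

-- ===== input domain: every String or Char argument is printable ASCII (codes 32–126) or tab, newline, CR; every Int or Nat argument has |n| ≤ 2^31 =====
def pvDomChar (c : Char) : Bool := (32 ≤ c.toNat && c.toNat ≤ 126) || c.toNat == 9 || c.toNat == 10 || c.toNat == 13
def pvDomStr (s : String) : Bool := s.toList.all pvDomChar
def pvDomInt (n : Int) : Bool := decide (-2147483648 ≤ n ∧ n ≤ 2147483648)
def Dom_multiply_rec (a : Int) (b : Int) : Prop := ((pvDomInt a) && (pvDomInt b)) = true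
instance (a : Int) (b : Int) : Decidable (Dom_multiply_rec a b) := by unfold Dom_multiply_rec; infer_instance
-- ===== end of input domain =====

-- B replaces A's recursive halve-and-double with an iterative shift-and-add bit loop (alternative decomposition, same cost).


-- ===== PORT A =====
-- Literal port of A's recursion; the 'a ≤ 0' guard only totalises the port where
-- the Python recursion never terminates (a < 0), which Pre_ excludes.
def multiply_rec (a : Int) (b : Int) : Int :=
  if a = 0 then 0
  else if a = 1 then b
  else if a ≤ 0 then 0  -- Python diverges here (RecursionError); outside Pre_
  else
    let half_a := PySem.Int.floordiv a 2   -- a >> 1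
    let half_prod := multiply_rec half_a b
    if PySem.Int.mod a 2 = 0 then half_prod + half_prod else half_prod + half_prod + b
termination_by a.toNat
decreasing_by
  have h2 : (0:Int) < 2 := by omega
  rw [PySem.Int.floordiv_eq_ediv_of_pos h2]
  omega

-- ===== PORT B =====
-- Port of Source B's while-loop: state (a, b, result); runs while a > 0.
def multiply_rec_alt_go (a : Int) (b : Int) (result : Int) : Int :=
  if 0 < a then
    multiply_rec_alt_go (PySem.Int.floordiv a 2) (b * 2)
      (if PySem.Int.mod a 2 = 1 then result + b else result)
  else result
termination_by a.toNat
decreasing_by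
  have h2 : (0:Int) < 2 := by omega
  rw [PySem.Int.floordiv_eq_ediv_of_pos h2]
  omega

def multiply_rec_alt (a : Int) (b : Int) : Int := multiply_rec_alt_go a b 0

-- ===== PRECONDITION & SPEC =====
-- A never returns for a < 0 (a >> 1 stalls at -1, RecursionError), so Pre_ admits a ≥ 0.
def Pre_multiply_rec (a : Int) (_b : Int) : Prop := 0 ≤ a
instance (a : Int) (b : Int) : Decidable (Pre_multiply_rec a b) := by unfold Pre_multiply_rec; infer_instance
def pvWitness_multiply_rec : Int × Int := (6, -7)

def Spec_multiply_rec (a : Int) (b : Int) (out : Int) : Prop := out = multiply_rec_alt a b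
instance (a : Int) (b : Int) (out : Int) : Decidable (Spec_multiply_rec a b out) := by unfold Spec_multiply_rec; infer_instance

-- ===== CLAIM (what is proved, stated in full; the proofs are below) =====
def Claim_equal_multiply_rec : Prop := ∀ (a : Int) (b : Int), Dom_multiply_rec a b → Pre_multiply_rec a b → Spec_multiply_rec a b (multiply_rec a b)

-- ===== LEMMAS AND PROOFS =====

theorem multiply_rec_eq_mul (a b : Int) (ha : 0 ≤ a) : multiply_rec a b = a * b := by
  induction hn : a.toNat using Nat.strong_induction_on generalizing a with
  | _ n ih =>
  by_cases h0 : a = 0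
  · simp [multiply_rec, h0]
  by_cases h1 : a = 1
  · simp [multiply_rec, h1]
  have hle : ¬ a ≤ 0 := by omega
  have h2 : (0:Int) < 2 := by omega
  have hd : PySem.Int.floordiv a 2 = a / 2 := PySem.Int.floordiv_eq_ediv_of_pos h2
  have hh : 0 ≤ PySem.Int.floordiv a 2 := by rw [hd]; omega
  have hlt : (PySem.Int.floordiv a 2).toNat < n := by rw [hd]; omega
  rw [multiply_rec]
  simp only [if_neg h0, if_neg h1, if_neg hle]
  rw [ih _ hlt _ hh rfl, hd, PySem.Int.mod_eq_emod_of_pos h2]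
  have hx : 2 * (a / 2) + a % 2 = a := Int.mul_ediv_add_emod a 2
  by_cases h : a % 2 = 0
  · rw [if_pos h]; linear_combination b * hx - b * h
  · have h1 : a % 2 = 1 := by omega
    rw [if_neg h]; linear_combination b * hx - b * h1

theorem multiply_rec_alt_go_eq (a b r : Int) (ha : 0 ≤ a) :
    multiply_rec_alt_go a b r = a * b + r := by
  induction hn : a.toNat using Nat.strong_induction_on generalizing a b r with
  | _ n ih =>
  by_cases hpos : 0 < a
  · have h2 : (0:Int) < 2 := by omega
    have hd : PySem.Int.floordiv a 2 = a / 2 := PySem.Int.floordiv_eq_ediv_of_pos h2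
    have hh : 0 ≤ PySem.Int.floordiv a 2 := by rw [hd]; omega
    have hlt : (PySem.Int.floordiv a 2).toNat < n := by rw [hd]; omega
    rw [multiply_rec_alt_go, if_pos hpos, ih _ hlt _ _ _ hh rfl, hd,
      PySem.Int.mod_eq_emod_of_pos h2]
    have hx : 2 * (a / 2) + a % 2 = a := Int.mul_ediv_add_emod a 2
    by_cases h : a % 2 = 1
    · rw [if_pos h]; linear_combination b * hx - b * h
    · have h0 : a % 2 = 0 := by omega
      rw [if_neg h]; linear_combination b * hx - b * h0
  · rw [multiply_rec_alt_go, if_neg hpos]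
    have : a = 0 := by omega
    simp [this]

-- ===== VERDICT (by name: the statement is the Claim_ definition above) =====
theorem multiply_rec_spec : Claim_equal_multiply_rec := by
  intro a b _ hpre
  unfold Spec_multiply_rec multiply_rec_alt
  rw [multiply_rec_eq_mul a b hpre, multiply_rec_alt_go_eq a b 0 hpre]
  ring
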